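-- pv_equiv track=rewrite | github.com/udoyen/scratches | scratch_14.py | my_check
-- ===== SOURCE A (Python) =====
-- def my_check(s: str):
--
--     is_valid = True
--
--     s1 = ['[', ']']
--     s2 = ['{', '}']
--     s3 = ['(', ')']
--
--     sm = [s1, s2, s3]
--
--     for i in s:
--         for n in sm:
--             if i in n:
--                 n.pop(n.index(i))
--
--     for k in sm:
--         if len(k) == 1:
--             is_valid = False
--
--     return is_valid
-- ===== SOURCE B (Python) =====
-- def my_check(s: str):
--     for o, c in (('[', ']'), ('{', '}'), ('(', ')')):
--         if (o in s) != (c in s):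
--             return False
--     return True
-- ===== Notes on version B (the rewrite author's own statement) =====
-- stated objective: simpler
-- what changed: Instead of simulating removals from mutable pair lists while scanning the string character by character and then checking leftover lengths, B loops over the three bracket pairs and returns False as soon as exactly one of a pair's two characters occurs in the string.
import Mathlib
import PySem

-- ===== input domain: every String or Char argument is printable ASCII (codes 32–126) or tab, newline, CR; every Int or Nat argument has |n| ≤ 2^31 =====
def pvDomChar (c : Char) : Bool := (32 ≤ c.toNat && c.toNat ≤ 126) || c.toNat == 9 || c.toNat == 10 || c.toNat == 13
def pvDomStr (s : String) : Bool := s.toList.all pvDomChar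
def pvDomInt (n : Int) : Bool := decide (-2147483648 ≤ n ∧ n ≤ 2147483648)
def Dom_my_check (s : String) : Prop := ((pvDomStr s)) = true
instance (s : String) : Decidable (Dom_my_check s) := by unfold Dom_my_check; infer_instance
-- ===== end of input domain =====

-- B replaces A's mutable pair-list removal simulation by a direct per-pair membership-parity check; objective: simpler.


-- ===== PORT A =====
-- inner body of A's nested loop: 'if i in n: n.pop(n.index(i))'
def pvStep (i : Char) (n : List Char) : List Char :=
  if i ∈ n then
    match PySem.List.index? n i with
    | some k =>
      match PySem.List.pop? n (k : Int) with
      | some r => r.2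
      | none => n
    | none => n
  else n

def my_check (s : String) : Bool :=
  let sm : List (List Char) := [['[', ']'], ['{', '}'], ['(', ')']]
  let sm := s.toList.foldl (fun sm i => sm.map (pvStep i)) sm
  sm.foldl (fun is_valid k => if k.length == 1 then false else is_valid) true

-- ===== PORT B =====
def my_check_alt (s : String) : Bool :=
  [('[', ']'), ('{', '}'), ('(', ')')].all
    (fun p => s.toList.contains p.1 == s.toList.contains p.2)

-- ===== PRECONDITION & SPEC =====
def Spec_my_check (s : String) (out : Bool) : Prop := out = my_check_alt s
instance (s : String) (out : Bool) : Decidable (Spec_my_check s out) := by unfold Spec_my_check; infer_instance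

-- ===== CLAIM (what is proved, stated in full; the proofs are below) =====
def Claim_equal_my_check : Prop := ∀ (s : String), Dom_my_check s → Spec_my_check s (my_check s)

-- ===== LEMMAS AND PROOFS =====

-- the outer fold over characters acts on each pair list independently
theorem pv_foldl_map (cs : List Char) (sm : List (List Char)) :
    cs.foldl (fun sm i => sm.map (pvStep i)) sm
      = sm.map (fun n => cs.foldl (fun n i => pvStep i n) n) := by
  induction cs generalizing sm with
  | nil => simp
  | cons i cs ih => simp [List.foldl_cons, ih, List.map_map]

-- one step on a duplicate-free list is a filter
theorem pv_step_eq (i : Char) (n : List Char) (h : n.Nodup) :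
    pvStep i n = n.filter (fun x => x ≠ i) := by
  unfold pvStep
  by_cases hm : i ∈ n
  · rw [if_pos hm]
    rcases (PySem.List.index?_isSome_iff n i).mpr hm |> Option.isSome_iff_exists.mp with ⟨k, hk⟩
    simp only [hk]
    obtain ⟨hklt, -, -⟩ := PySem.List.getElem_of_index?_eq_some hk
    rw [PySem.List.pop?_natCast n k hklt]
    have hidx : n.idxOf i = k := by
      rw [PySem.List.index?_eq_idxOf?] at hk
      rw [List.idxOf_eq_getD_idxOf?, hk]; rfl
    show n.eraseIdx k = _
    rw [← hidx, List.eraseIdx_idxOf_eq_erase, h.erase_eq_filter]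
    simp only [bne]
    apply List.filter_congr
    intro x _
    by_cases hx : i = x
    · subst hx; simp
    · simp [Ne.symm hx]
  · rw [if_neg hm]
    rw [(List.filter_eq_self ..).mpr]
    intro a ha
    simp only [decide_eq_true_eq]
    rintro rfl; exact hm ha

-- folding all characters over a duplicate-free pair list removes exactly the characters present
theorem pv_foldl_pair (cs : List Char) (n : List Char) (h : n.Nodup) :
    cs.foldl (fun n i => pvStep i n) n = n.filter (fun x => !cs.contains x) := by
  induction cs generalizing n with
  | nil => simp
  | cons i cs ih =>
    rw [List.foldl_cons, pv_step_eq i n h, ih _ (h.filter _), List.filter_filter]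
    apply List.filter_congr
    intro x _
    by_cases hxi : x = i
    · subst hxi; simp
    · simp [hxi]

-- ===== VERDICT (by name: the statement is the Claim_ definition above) =====
theorem my_check_spec : Claim_equal_my_check := by
  intro s _
  unfold Spec_my_check my_check my_check_alt
  simp only [pv_foldl_map, List.map_cons, List.map_nil]
  rw [pv_foldl_pair _ _ (by decide), pv_foldl_pair _ _ (by decide),
      pv_foldl_pair _ _ (by decide)]
  by_cases h1 : '[' ∈ s.toList <;> by_cases h2 : ']' ∈ s.toList <;>
    by_cases h3 : '{' ∈ s.toList <;> by_cases h4 : '}' ∈ s.toList <;>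
      by_cases h5 : '(' ∈ s.toList <;> by_cases h6 : ')' ∈ s.toList <;>
        simp [h1, h2, h3, h4, h5, h6]
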